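-- pv_equiv track=rewrite | github.com/FedorSannikov1988/Getting_to_know_Python | homework6/main8.py | create_list_fibonacci_v1
-- ===== SOURCE A (Python) =====
-- def namber_positive_fibonacci(namber: int) -> int:
--
--     if namber == 0:
--         return 0
--     elif namber in [1, 2]:
--         return 1
--     else:
--         return (namber_positive_fibonacci(namber-1) + namber_positive_fibonacci(namber-2))
--
-- def create_list_fibonacci_v1(lenght_fibonacci: int) -> list:
--
--         lenght_fibonacci = abs(lenght_fibonacci)
--
--         resalt_negative_list = list()
--
--         resalt_positive_list = list()
--
--         for count in range(-lenght_fibonacci, 0, 1):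
--             resalt_negative_list.append(((-1)**(abs(count)+1))*namber_positive_fibonacci(abs(count)))
--
--         for count in range(0, lenght_fibonacci + 1, 1):
--             resalt_positive_list.append(namber_positive_fibonacci(count))
--
--         list_fibonacci = [*resalt_negative_list, *resalt_positive_list]
--
--         return list_fibonacci
-- ===== SOURCE B (Python) =====
-- def create_list_fibonacci_v1(lenght_fibonacci: int) -> list:
--     n = abs(lenght_fibonacci)
--     a, b = 0, 1
--     positives = []
--     negatives = []
--     for k in range(n + 1):
--         positives.append(a)
--         if k > 0:
--             negatives.append(-a if k % 2 == 0 else a)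
--         a, b = b, a + b
--     return negatives[::-1] + positives
-- ===== Notes on version B (the rewrite author's own statement) =====
-- stated objective: faster
-- what changed: Replaces the exponential recursive Fibonacci helper called once per element (and the two separate index loops) with a single linear pass that carries the (a,b) Fibonacci pair and builds the positive list and the signed negative list simultaneously. Pre_ excludes only the inputs on which A raises RecursionError (|n| at/beyond CPython's recursion limit, with a small safety margin).
import Mathlib
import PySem

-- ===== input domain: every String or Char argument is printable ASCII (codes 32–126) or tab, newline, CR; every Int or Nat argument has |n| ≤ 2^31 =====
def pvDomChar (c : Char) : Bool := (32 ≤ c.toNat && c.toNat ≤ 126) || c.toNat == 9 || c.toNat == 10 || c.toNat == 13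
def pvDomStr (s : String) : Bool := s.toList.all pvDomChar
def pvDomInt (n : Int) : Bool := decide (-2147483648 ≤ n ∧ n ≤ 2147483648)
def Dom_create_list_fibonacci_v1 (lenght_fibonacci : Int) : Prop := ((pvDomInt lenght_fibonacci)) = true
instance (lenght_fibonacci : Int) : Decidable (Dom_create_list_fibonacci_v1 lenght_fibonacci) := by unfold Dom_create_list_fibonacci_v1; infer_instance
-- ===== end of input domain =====

-- B replaces the exponential per-element recursive Fibonacci with one linear pass that carries
-- the (a, b) Fibonacci pair and builds both halves at once.


-- ===== PORT A =====
-- A's recursive helper; realised as Nat recursion on `toNat` (exact for the nonnegative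
-- arguments A passes: abs(count) and range(0, n+1) values).
def nfibA : Nat → Int
  | 0 => 0
  | 1 => 1
  | 2 => 1
  | n + 3 => nfibA (n + 2) + nfibA (n + 1)

def namber_positive_fibonacci (namber : Int) : Int := nfibA namber.toNat

def create_list_fibonacci_v1 (lenght_fibonacci : Int) : List Int :=
  let n := |lenght_fibonacci|
  let resalt_negative_list :=
    (PySem.List.pyRange (-n) 0 1).foldl
      (fun acc count => acc ++ [(-1 : Int) ^ (count.natAbs + 1) * namber_positive_fibonacci |count|]) []
  let resalt_positive_list :=
    (PySem.List.pyRange 0 (n + 1) 1).foldl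
      (fun acc count => acc ++ [namber_positive_fibonacci count]) []
  resalt_negative_list ++ resalt_positive_list

-- ===== PORT B =====
def create_list_fibonacci_v1_alt (lenght_fibonacci : Int) : List Int :=
  let n := |lenght_fibonacci|
  let st := (PySem.List.pyRange 0 (n + 1) 1).foldl
    (fun (st : (List Int × List Int) × (Int × Int)) k =>
      let pos := st.1.1; let neg := st.1.2; let a := st.2.1; let b := st.2.2
      ((pos ++ [a],
        if k > 0 then neg ++ [if PySem.Int.mod k 2 == 0 then -a else a] else neg),
       (b, a + b)))
    (([], []), (0, 1))
  st.1.2.reverse ++ st.1.1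

-- ===== PRECONDITION & SPEC =====
-- Pre_ excludes the inputs on which A RAISES: its doubly-recursive helper's leftmost descent
-- has depth |n|, so CPython raises RecursionError for |n| at or beyond the recursion limit
-- (~999 under the default limit 1000); the bound 900 leaves a small margin because the exact
-- raising point depends on the interpreter's current stack depth.
def Pre_create_list_fibonacci_v1 (lenght_fibonacci : Int) : Prop := lenght_fibonacci.natAbs ≤ 900
instance (lenght_fibonacci : Int) : Decidable (Pre_create_list_fibonacci_v1 lenght_fibonacci) := by unfold Pre_create_list_fibonacci_v1; infer_instance
def pvWitness_create_list_fibonacci_v1 : Int := (5)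

def Spec_create_list_fibonacci_v1 (lenght_fibonacci : Int) (out : List Int) : Prop := out = create_list_fibonacci_v1_alt lenght_fibonacci
instance (lenght_fibonacci : Int) (out : List Int) : Decidable (Spec_create_list_fibonacci_v1 lenght_fibonacci out) := by unfold Spec_create_list_fibonacci_v1; infer_instance

-- ===== CLAIM (what is proved, stated in full; the proofs are below) =====
def Claim_equal_create_list_fibonacci_v1 : Prop := ∀ (lenght_fibonacci : Int), Dom_create_list_fibonacci_v1 lenght_fibonacci → Pre_create_list_fibonacci_v1 lenght_fibonacci → Spec_create_list_fibonacci_v1 lenght_fibonacci (create_list_fibonacci_v1 lenght_fibonacci)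

-- ===== LEMMAS AND PROOFS =====

theorem nfibA_rec (m : Nat) : nfibA (m + 2) = nfibA m + nfibA (m + 1) := by
  cases m with
  | zero => decide
  | succ n => show nfibA (n + 3) = _ ; rw [nfibA] ; ring

-- signed Fibonacci value used on the negative side
def sfib (k : Nat) : Int := if k % 2 = 0 then -nfibA k else nfibA k

theorem foldl_app {α β : Type} (f : α → β) (l : List α) :
    ∀ acc : List β, l.foldl (fun a c => a ++ [f c]) acc = acc ++ l.map f := by
  induction l with
  | nil => intro acc; simp
  | cons x xs ih => intro acc; simp [List.foldl_cons, ih]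

-- B's fold invariant over List.range
theorem B_inv (m : Nat) :
    (List.range m).foldl
      (fun (st : (List Int × List Int) × (Int × Int)) (k : Nat) =>
        (((st.1.1 ++ [st.2.1]),
          if ((k : Int)) > 0 then st.1.2 ++ [if PySem.Int.mod (k : Int) 2 == 0 then -st.2.1 else st.2.1] else st.1.2),
         (st.2.2, st.2.1 + st.2.2)))
      (([], []), (0, 1))
    = (((List.range m).map (fun k => nfibA k),
        (List.range (m - 1)).map (fun i => sfib (i + 1))),
       (nfibA m, nfibA (m + 1))) := by
  induction m with
  | zero => simp [nfibA]
  | succ j ih =>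
    rw [List.range_succ, List.foldl_append, ih]
    simp only [List.foldl_cons, List.foldl_nil]
    refine congrArg₂ _ (congrArg₂ _ ?_ ?_) ?_
    · simp
    · rcases Nat.eq_zero_or_pos j with hj | hj
      · subst hj; simp
      · have h0 : ((j : Int)) > 0 := by exact_mod_cast hj
        simp only [h0, if_true]
        have hmod : PySem.Int.mod (j : Int) 2 = ((j % 2 : Nat) : Int) := by
          simp
        have hsucc : j + 1 - 1 = (j - 1) + 1 := by omega
        rw [hsucc, List.range_succ, List.map_append]
        congr 1
        simp only [List.map, hmod]
        have hj1 : j - 1 + 1 = j := by omega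
        rw [hj1]
        by_cases hpar : j % 2 = 0
        · have hc : ((((j % 2 : Nat) : Int)) == 0) = true := by simp [hpar]
          rw [hc]; simp [sfib, hpar]
        · have hc : ((((j % 2 : Nat) : Int)) == 0) = false := by
            simp only [beq_eq_false_iff_ne, ne_eq]
            intro h; exact hpar (by exact_mod_cast h)
          rw [hc]; simp [sfib, hpar]
    · refine congrArg₂ Prod.mk rfl ?_
      exact (nfibA_rec j).symm

theorem sign_eq (k : Nat) : (-1 : Int) ^ (k + 1) * nfibA k = sfib k := by
  rcases Nat.even_or_odd k with he | ho
  · have h2 : k % 2 = 0 := Nat.even_iff.mp he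
    have : (-1 : Int) ^ (k + 1) = -1 := by
      rw [pow_succ, he.neg_one_pow]; ring
    simp [sfib, h2, this]
  · have h2 : k % 2 = 1 := Nat.odd_iff.mp ho
    have : (-1 : Int) ^ (k + 1) = 1 := by
      have : Even (k + 1) := Odd.add_one ho
      exact this.neg_one_pow
    simp [sfib, h2, this]

theorem neg_reverse (N : Nat) :
    (List.range N).map (fun k => sfib (N - k))
      = ((List.range N).map (fun i => sfib (i + 1))).reverse := by
  apply List.ext_getElem
  · simp
  · intro k h1 h2
    simp only [List.length_map, List.length_range] at h1 h2
    simp only [List.getElem_reverse, List.getElem_map, List.getElem_range, List.length_map,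
      List.length_range]
    congr 1
    omega

theorem create_list_fibonacci_v1_eq (L : Int) :
    create_list_fibonacci_v1 L = create_list_fibonacci_v1_alt L := by
  unfold create_list_fibonacci_v1 create_list_fibonacci_v1_alt
  set N := L.natAbs with hN
  have habs : |L| = (N : Int) := by rw [hN, Int.abs_eq_natAbs]
  simp only [habs]
  rw [PySem.List.pyRange_one (-(N : Int)) 0, PySem.List.pyRange_one 0 ((N : Int) + 1)]
  have hlen1 : ((0 : Int) - -(N : Int)).toNat = N := by omega
  have hlen2 : (((N : Int) + 1) - 0).toNat = N + 1 := by omega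
  rw [hlen1, hlen2]
  rw [foldl_app, foldl_app, List.nil_append, List.nil_append]
  simp only [zero_add]
  rw [List.foldl_map, B_inv (N + 1)]
  simp only [Nat.add_sub_cancel, List.map_map]
  refine congrArg₂ (· ++ ·) ?_ ?_
  · -- negative halves agree
    rw [← neg_reverse N]
    apply List.map_congr_left
    intro k hk
    have hkN : k < N := List.mem_range.mp hk
    have h1 : (-(N : Int) + (k : Int)).natAbs = N - k := by omega
    have h2 : |(-(N : Int) + (k : Int))| = ((N - k : Nat) : Int) := by
      rw [Int.abs_eq_natAbs, h1]
    simp only [Function.comp_apply]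
    rw [h1, h2]
    unfold namber_positive_fibonacci
    rw [Int.toNat_natCast]
    exact sign_eq (N - k)
  · -- positive halves agree
    apply List.map_congr_left
    intro k _
    simp only [Function.comp_apply]
    unfold namber_positive_fibonacci
    norm_num

-- ===== VERDICT (by name: the statement is the Claim_ definition above) =====
theorem create_list_fibonacci_v1_spec : Claim_equal_create_list_fibonacci_v1 := by
  intro L _ _
  unfold Spec_create_list_fibonacci_v1
  exact create_list_fibonacci_v1_eq L
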